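-- pv_equiv track=rewrite | github.com/Xza85hrf/AudioSmith | audiosmith/pipeline/helpers.py | _dedup_repeated_words
-- ===== SOURCE A (Python) =====
-- def _dedup_repeated_words(text: str, max_repeats: int = 2) -> str:
--     """Collapse runs of 3+ identical consecutive words to max_repeats."""
--     words = text.split()
--     if len(words) < 3:
--         return text
--     result = [words[0]]
--     count = 1
--     for w in words[1:]:
--         if w.lower() == result[-1].lower():
--             count += 1
--             if count <= max_repeats:
--                 result.append(w)
--         else:
--             result.append(w)
--             count = 1
--     return ' '.join(result)
-- ===== SOURCE B (Python) =====
-- def _dedup_repeated_words(text: str, max_repeats: int = 2) -> str: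
--     """Collapse runs of 3+ identical consecutive words to max_repeats."""
--     words = text.split()
--     if len(words) < 3:
--         return text
--     keep = max(1, max_repeats)
--     out = []
--     i = 0
--     n = len(words)
--     while i < n:
--         w = words[i].lower()
--         j = i + 1
--         while j < n and words[j].lower() == w:
--             j += 1
--         out.extend(words[i:min(j, i + keep)])
--         i = j
--     return ' '.join(out)
-- ===== Notes on version B (the rewrite author's own statement) =====
-- stated objective: simpler
-- what changed: B splits the word list into maximal case-insensitive runs with an explicit two-pointer run scan and keeps the first max(1, max_repeats) words of each run, instead of A's running count compared against the lowercase of result[-1].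
import Mathlib
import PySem

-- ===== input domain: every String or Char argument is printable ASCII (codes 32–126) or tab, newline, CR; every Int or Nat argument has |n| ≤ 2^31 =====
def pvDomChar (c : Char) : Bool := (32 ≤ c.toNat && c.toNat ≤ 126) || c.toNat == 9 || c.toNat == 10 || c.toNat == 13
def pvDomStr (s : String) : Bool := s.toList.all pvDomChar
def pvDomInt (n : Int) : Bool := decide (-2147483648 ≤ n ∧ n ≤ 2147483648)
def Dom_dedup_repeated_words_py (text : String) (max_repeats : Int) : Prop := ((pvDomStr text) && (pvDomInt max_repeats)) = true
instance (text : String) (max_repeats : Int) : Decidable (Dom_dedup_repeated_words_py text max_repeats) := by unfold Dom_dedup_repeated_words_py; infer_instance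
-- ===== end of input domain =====

-- B groups the words into maximal case-insensitive runs and keeps each run's first max(1, max_repeats)
-- words, instead of A's running count compared against result[-1]; objective: simpler decomposition, same cost.

-- ===== PORT A =====
-- A's loop: state (result, count); result[-1] is pyGetD res (-1) "" (res is never empty when read).
def dedupLoopA (mr : Int) : List String → List String → Int → List String
  | [], res, _ => res
  | w :: ws, res, count =>
    if PySem.Str.lower w == PySem.Str.lower (PySem.List.pyGetD res (-1) "") then
      if count + 1 ≤ mr then dedupLoopA mr ws (res ++ [w]) (count + 1)
      else dedupLoopA mr ws res (count + 1)
    else dedupLoopA mr ws (res ++ [w]) 1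

def dedup_repeated_words_py (text : String) (max_repeats : Int) : String :=
  let words := PySem.Str.split₀ text
  if words.length < 3 then text
  else
    match words with
    | [] => text  -- unreachable: length ≥ 3
    | w0 :: rest => PySem.Str.join " " (dedupLoopA max_repeats rest [w0] 1)

-- ===== PORT B =====
-- B's loop: for each maximal run of words with the same lowercase form, keep its first `keep` words.
def dedupRunsB (keep : Nat) : List String → List String
  | [] => []
  | w :: ws =>
    (w :: ws.takeWhile (fun x => PySem.Str.lower x == PySem.Str.lower w)).take keep
      ++ dedupRunsB keep (ws.dropWhile (fun x => PySem.Str.lower x == PySem.Str.lower w))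
termination_by l => l.length
decreasing_by
  simp only [List.length_cons]
  exact Nat.lt_succ_of_le (List.length_dropWhile_le _ _)

def dedup_repeated_words_py_alt (text : String) (max_repeats : Int) : String :=
  let words := PySem.Str.split₀ text
  if words.length < 3 then text
  else PySem.Str.join " " (dedupRunsB (max 1 max_repeats).toNat words)

-- ===== PRECONDITION & SPEC =====
def Spec_dedup_repeated_words_py (text : String) (max_repeats : Int) (out : String) : Prop := out = dedup_repeated_words_py_alt text max_repeats
instance (text : String) (max_repeats : Int) (out : String) : Decidable (Spec_dedup_repeated_words_py text max_repeats out) := by unfold Spec_dedup_repeated_words_py; infer_instance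

-- ===== CLAIM (what is proved, stated in full; the proofs are below) =====
def Claim_equal_dedup_repeated_words_py : Prop := ∀ (text : String) (max_repeats : Int), Dom_dedup_repeated_words_py text max_repeats → Spec_dedup_repeated_words_py text max_repeats (dedup_repeated_words_py text max_repeats)

-- ===== LEMMAS AND PROOFS =====

lemma getLast_of_getLast? {l : List String} (h : l ≠ []) {y : String} (hy : l.getLast? = some y) :
    l.getLast h = y := by
  rw [List.getLast?_eq_some_getLast h] at hy
  exact Option.some_inj.mp hy

-- the last kept word of a partially consumed run still has the run's lowercase form
lemma lower_getLast_append_take {r : List String} {w : String} (t : List String)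
    (ht : ∀ x ∈ t, PySem.Str.lower x = PySem.Str.lower w) (h : r ++ [w] ++ t ≠ []) :
    PySem.Str.lower ((r ++ [w] ++ t).getLast h) = PySem.Str.lower w := by
  rcases List.eq_nil_or_concat t with rfl | ⟨t', y, rfl⟩
  · rw [getLast_of_getLast? (y := w) h (by simp)]
  · rw [getLast_of_getLast? (y := y) h (by rw [List.concat_eq_append, ← List.append_assoc]; exact List.getLast?_concat)]
    exact ht y (by simp)

-- Stepping A's loop through an entire run of words whose lowercase equals that of result's last word.
lemma dedupLoopA_run (mr : Int) (w : String) :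
    ∀ (run : List String), (∀ x ∈ run, PySem.Str.lower x = PySem.Str.lower w) →
    ∀ (rest res : List String) (c : Int) (h : res ≠ []),
      PySem.Str.lower (res.getLast h) = PySem.Str.lower w →
      dedupLoopA mr (run ++ rest) res c
        = dedupLoopA mr rest (res ++ run.take (mr - c).toNat) (c + run.length) := by
  intro run
  induction run with
  | nil => intro _ rest res c h _; simp

  | cons x run' ih =>
    intro hall rest res c h hlast
    have hx : PySem.Str.lower x = PySem.Str.lower w := hall x (by simp)
    have hres : PySem.List.pyGetD res (-1) "" = res.getLast h := PySem.List.pyGetD_neg_one res "" h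
    have hcond : (PySem.Str.lower x == PySem.Str.lower (PySem.List.pyGetD res (-1) "")) = true := by
      rw [hres, hlast, hx]; simp
    simp only [List.cons_append, dedupLoopA, hcond, if_true]
    by_cases hc : c + 1 ≤ mr
    · rw [if_pos hc]
      have h' : res ++ [x] ≠ [] := by simp
      have hlast' : PySem.Str.lower ((res ++ [x]).getLast h') = PySem.Str.lower w := by
        rw [List.getLast_concat]; exact hx
      rw [ih (fun y hy => hall y (by simp [hy])) rest (res ++ [x]) (c + 1) h' hlast']
      have ht : (mr - c).toNat = (mr - (c + 1)).toNat + 1 := by omega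
      rw [ht]
      simp only [List.take_succ_cons, List.append_assoc, List.cons_append, List.nil_append,
        List.length_cons]
      push_cast
      ring_nf
    · rw [if_neg hc]
      rw [ih (fun y hy => hall y (by simp [hy])) rest res (c + 1) h hlast]
      have ht : (mr - c).toNat = 0 := by omega
      have ht' : (mr - (c + 1)).toNat = 0 := by omega
      simp only [ht, ht', List.take_zero, List.append_nil, List.length_cons]
      push_cast
      ring_nf

-- A's loop, started right after keeping the first word of a run, computes B's run-based result.
lemma dedupLoopA_eq_runs (mr : Int) :
    ∀ (n : Nat) (ws : List String), ws.length ≤ n → ∀ (r : List String) (w : String),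
      dedupLoopA mr ws (r ++ [w]) 1 = r ++ dedupRunsB (max 1 mr).toNat (w :: ws) := by
  intro n
  induction n with
  | zero =>
    intro ws hws r w
    have hnil : ws = [] := List.eq_nil_of_length_eq_zero (Nat.le_zero.mp hws)
    subst hnil
    rw [dedupRunsB]
    simp [dedupLoopA, dedupRunsB, List.take_of_length_le (show ([w]).length ≤ (max 1 mr).toNat by simp only [List.length_cons, List.length_nil]; omega)]
  | succ n ih =>
    intro ws hws r w
    set P : String → Bool := fun x => PySem.Str.lower x == PySem.Str.lower w with hP
    have hsplit : ws = ws.takeWhile P ++ ws.dropWhile P := (List.takeWhile_append_dropWhile).symm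
    have hallrun : ∀ x ∈ ws.takeWhile P, PySem.Str.lower x = PySem.Str.lower w := by
      intro x hx
      have := List.mem_takeWhile_imp hx
      simpa [hP] using this
    have hne : r ++ [w] ≠ [] := by simp
    have hlast : PySem.Str.lower ((r ++ [w]).getLast hne) = PySem.Str.lower w := by
      rw [List.getLast_concat]
    have hkeep : (max 1 mr).toNat - 1 = (mr - 1).toNat := by omega
    have hstep := dedupLoopA_run mr w (ws.takeWhile P) hallrun (ws.dropWhile P) (r ++ [w]) 1 hne hlast
    have hRunsB : dedupRunsB (max 1 mr).toNat (w :: ws)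
        = (w :: (ws.takeWhile P).take (mr - 1).toNat) ++ dedupRunsB (max 1 mr).toNat (ws.dropWhile P) := by
      rw [dedupRunsB, ← hP]
      congr 1
      rw [show (max 1 mr).toNat = ((max 1 mr).toNat - 1) + 1 by omega, List.take_succ_cons, hkeep]
    rcases hrest : ws.dropWhile P with _ | ⟨w', rest'⟩
    · rw [hrest] at hstep
      rw [hRunsB, hrest]
      conv_lhs => rw [hsplit, hrest]
      rw [hstep]
      simp [dedupLoopA, dedupRunsB, List.append_assoc]
    · rw [hrest] at hstep
      have hw' : P w' = false := by
        have := List.head_dropWhile_not P (l := ws) (by rw [hrest]; simp)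
        simpa [hrest] using this
      have htake : ∀ x ∈ (ws.takeWhile P).take (mr - 1).toNat, PySem.Str.lower x = PySem.Str.lower w :=
        fun x hx => hallrun x (List.mem_of_mem_take hx)
      have hne2 : r ++ [w] ++ (ws.takeWhile P).take (mr - 1).toNat ≠ [] := by simp
      have hlast2 := lower_getLast_append_take ((ws.takeWhile P).take (mr - 1).toNat) htake hne2
      have hres2 : PySem.List.pyGetD (r ++ [w] ++ (ws.takeWhile P).take (mr - 1).toNat) (-1) ""
          = (r ++ [w] ++ (ws.takeWhile P).take (mr - 1).toNat).getLast hne2 :=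
        PySem.List.pyGetD_neg_one _ "" hne2
      have hcond : (PySem.Str.lower w' ==
          PySem.Str.lower (PySem.List.pyGetD (r ++ [w] ++ (ws.takeWhile P).take (mr - 1).toNat) (-1) "")) = false := by
        rw [hres2, hlast2]
        simpa [hP] using hw'
      have hlen : rest'.length ≤ n := by
        have h1 : (ws.dropWhile P).length ≤ ws.length := List.length_dropWhile_le _ _
        rw [hrest] at h1
        simp only [List.length_cons] at h1
        omega
      calc dedupLoopA mr ws (r ++ [w]) 1
          = dedupLoopA mr (w' :: rest')
              (r ++ [w] ++ (ws.takeWhile P).take (mr - 1).toNat) (1 + (ws.takeWhile P).length) := by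
            conv_lhs => rw [hsplit, hrest]
            rw [hstep]
        _ = dedupLoopA mr rest'
              ((r ++ [w] ++ (ws.takeWhile P).take (mr - 1).toNat) ++ [w']) 1 := by
            simp only [dedupLoopA, hcond, Bool.false_eq_true, if_false]
        _ = (r ++ [w] ++ (ws.takeWhile P).take (mr - 1).toNat)
              ++ dedupRunsB (max 1 mr).toNat (w' :: rest') := ih rest' hlen _ w'
        _ = r ++ dedupRunsB (max 1 mr).toNat (w :: ws) := by
            rw [hRunsB, hrest]; simp [List.append_assoc]

-- ===== VERDICT (by name: the statement is the Claim_ definition above) =====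
theorem dedup_repeated_words_py_spec : Claim_equal_dedup_repeated_words_py := by
  unfold Claim_equal_dedup_repeated_words_py
  intro text mr _
  unfold Spec_dedup_repeated_words_py dedup_repeated_words_py dedup_repeated_words_py_alt
  rcases hws : PySem.Str.split₀ text with _ | ⟨w0, rest⟩
  · simp
  · by_cases hlen : (w0 :: rest).length < 3
    · have h3 : rest.length + 1 < 3 := by simpa using hlen
      simp [h3]
    · have h3 : ¬ rest.length + 1 < 3 := by simpa using hlen
      simp only [List.length_cons, h3, if_false]
      have := dedupLoopA_eq_runs mr rest.length rest le_rfl [] w0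
      simpa using congrArg (PySem.Str.join " ") this
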